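-- pv_equiv track=rewrite | github.com/Genome-Bioinformatics-RadboudUMC/DeNovoCNN | denovonet/dataset.py | update_positions
-- ===== SOURCE A (Python) =====
-- def update_positions(positions):
--     new_positions = []
--
--     counter = 0
--     for idx, pos in enumerate(positions):
--
--         if idx == 0:
--             new_positions.append(str(pos))
--             continue
--
--         if pos == positions[idx - 1]:
--             counter += 1
--             new_positions.append(str(pos) + "_" + str(counter))
--         else:
--             counter = 0
--             new_positions.append(str(pos))
--
--     return new_positions
-- ===== SOURCE B (Python) =====
-- def update_positions(positions):
--     # Two-pointer run scan: find each maximal run of equal values, then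
--     # emit str(v) for the run's first element and str(v)+"_"+str(i) for the i-th.
--     new_positions = []
--     n = len(positions)
--     j = 0
--     while j < n:
--         k = j
--         while k < n and positions[k] == positions[j]:
--             k += 1
--         for i, v in enumerate(positions[j:k]):
--             new_positions.append(str(v) if i == 0 else str(v) + "_" + str(i))
--         j = k
--     return new_positions
-- ===== Notes on version B (the rewrite author's own statement) =====
-- stated objective: alternative
-- what changed: Replaces the previous-element comparison with a running counter by a two-pointer scan that extracts each maximal run of equal values and renders it with its own enumerate index.
import Mathlib
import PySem

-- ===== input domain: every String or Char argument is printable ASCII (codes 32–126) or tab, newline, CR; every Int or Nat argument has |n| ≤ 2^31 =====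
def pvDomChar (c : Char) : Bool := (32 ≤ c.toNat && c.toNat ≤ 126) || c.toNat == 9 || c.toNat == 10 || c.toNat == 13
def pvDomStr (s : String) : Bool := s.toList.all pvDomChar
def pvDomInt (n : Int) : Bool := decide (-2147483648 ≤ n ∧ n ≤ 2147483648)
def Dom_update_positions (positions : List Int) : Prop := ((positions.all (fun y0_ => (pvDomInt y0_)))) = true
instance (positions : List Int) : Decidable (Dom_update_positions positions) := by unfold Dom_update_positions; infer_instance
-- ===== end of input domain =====

-- ===== PORT A =====
-- B replaces A's previous-element comparison + running counter with a two-pointer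
-- maximal-run scan rendered per run (objective: alternative decomposition).
-- loop body of A's for-loop (state: (new_positions, counter))
def pvStepA (positions : List Int) (st : List String × Int) (ip : Int × Int) : List String × Int :=
  if ip.1 = 0 then (st.1 ++ [PySem.Int.toStr ip.2], st.2)
  else if PySem.List.pyGet? positions (ip.1 - 1) = some ip.2 then
    (st.1 ++ [PySem.Int.toStr ip.2 ++ "_" ++ PySem.Int.toStr (st.2 + 1)], st.2 + 1)
  else (st.1 ++ [PySem.Int.toStr ip.2], 0)

def update_positions (positions : List Int) : List String :=
  ((PySem.List.enumerate positions 0).foldl (pvStepA positions) ([], 0)).1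

-- ===== PORT B =====
-- rendering of the i-th member of a run (Source B's inner `str(v) if i == 0 else ...`)
def pvRender (iv : Int × Int) : String :=
  if iv.1 = 0 then PySem.Int.toStr iv.2
  else PySem.Int.toStr iv.2 ++ "_" ++ PySem.Int.toStr iv.1

def update_positions_alt (positions : List Int) : List String :=
  match positions with
  | [] => []
  | x :: xs =>
    ((PySem.List.enumerate (x :: xs.takeWhile (fun y => y == x)) 0).map pvRender)
      ++ update_positions_alt (xs.dropWhile (fun y => y == x))
termination_by positions.length
decreasing_by
  exact Nat.lt_succ_of_le (List.length_dropWhile_le _ _)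
-- ===== PRECONDITION & SPEC =====
def Spec_update_positions (positions : List Int) (out : List String) : Prop := out = update_positions_alt positions
instance (positions : List Int) (out : List String) : Decidable (Spec_update_positions positions out) := by unfold Spec_update_positions; infer_instance

-- ===== CLAIM (what is proved, stated in full; the proofs are below) =====
def Claim_equal_update_positions : Prop := ∀ (positions : List Int), Dom_update_positions positions → Spec_update_positions positions (update_positions positions)

-- ===== LEMMAS AND PROOFS =====

-- common shape: the output for the remaining suffix, given the previous value and counter
def pvRun (prev c : Int) : List Int → List String
  | [] => []
  | p :: rest =>
    if p = prev then (PySem.Int.toStr p ++ "_" ++ PySem.Int.toStr (c + 1)) :: pvRun p (c + 1) rest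
    else PySem.Int.toStr p :: pvRun p 0 rest

theorem pvFoldA (L : List Int) (suffix : List Int) : ∀ (k : Nat), 1 ≤ k → L.drop k = suffix →
    ∀ (acc : List String) (c prev : Int), L[k - 1]? = some prev →
    ((PySem.List.enumerate suffix (k : Int)).foldl (pvStepA L) (acc, c)).1
      = acc ++ pvRun prev c suffix := by
  induction suffix with
  | nil => intro k hk hdrop acc c prev hprev; simp [PySem.List.enumerate, pvRun]
  | cons p rest ih =>
    intro k hk hdrop acc c prev hprev
    have hkpos : (k : Int) ≠ 0 := by exact_mod_cast Nat.one_le_iff_ne_zero.mp hk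
    have hget : L[k]? = some p := by
      have h : (L.drop k)[0]? = L[k + 0]? := List.getElem?_drop
      rw [hdrop] at h
      simpa using h.symm
    have hdrop' : L.drop (k + 1) = rest := by
      have : L.drop (k + 1) = (L.drop k).drop 1 := by
        rw [List.drop_drop]
      simp [this, hdrop]
    have hprev' : (PySem.List.pyGet? L ((k : Int) - 1)) = some prev := by
      have : ((k : Int) - 1) = ((k - 1 : Nat) : Int) := by omega
      rw [this, PySem.List.pyGet?_natCast]
      exact hprev
    rw [PySem.List.enumerate_cons]
    simp only [List.foldl_cons]
    have hcast : (k : Int) + 1 = ((k + 1 : Nat) : Int) := by push_cast; ring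
    have hk0 : ¬ k = 0 := by omega
    by_cases hpe : p = prev
    · have : pvStepA L (acc, c) ((k : Int), p) =
        (acc ++ [PySem.Int.toStr p ++ "_" ++ PySem.Int.toStr (c + 1)], c + 1) := by
        simp [pvStepA, hprev', hpe, hk0]
      rw [this, hcast, ih (k + 1) (by omega) hdrop' _ _ p (by simpa using hget)]
      simp [pvRun, hpe]
    · have hpe' : ¬ prev = p := fun h => hpe h.symm
      have hne : ¬ (PySem.List.pyGet? L ((k : Int) - 1) = some p) := by
        rw [hprev']
        simp only [Option.some.injEq]
        exact hpe'
      have : pvStepA L (acc, c) ((k : Int), p) = (acc ++ [PySem.Int.toStr p], 0) := by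
        simp [pvStepA, hne, hk0]
      rw [this, hcast, ih (k + 1) (by omega) hdrop' _ _ p (by simpa using hget)]
      simp [pvRun, hpe]

theorem pvA_eq (L : List Int) :
    update_positions L = match L with
      | [] => []
      | x :: xs => PySem.Int.toStr x :: pvRun x 0 xs := by
  cases L with
  | nil => simp [update_positions, PySem.List.enumerate]
  | cons x xs =>
    simp only [update_positions]
    rw [PySem.List.enumerate_cons]
    simp only [List.foldl_cons]
    have h0 : pvStepA (x :: xs) (([], 0) : List String × Int) ((0 : Int), x)
        = ([PySem.Int.toStr x], 0) := by simp [pvStepA]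
    rw [h0, show ((0 : Int) + 1) = ((1 : Nat) : Int) by norm_num,
      pvFoldA (x :: xs) xs 1 (by omega) (by simp) [PySem.Int.toStr x] 0 x (by simp)]
    simp

-- suffixed rendering of a whole run (all members equal x), with the continuation
theorem pvRun_append (r : List Int) (x : Int) : ∀ (c : Int), (∀ v ∈ r, v = x) →
    ∀ (rest : List Int), pvRun x c (r ++ rest)
      = (PySem.List.enumerate r (c + 1)).map
          (fun iv => PySem.Int.toStr iv.2 ++ "_" ++ PySem.Int.toStr iv.1)
        ++ pvRun x (c + r.length) rest := by
  induction r with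
  | nil => intro c _ rest; simp [PySem.List.enumerate]
  | cons v r' ih =>
    intro c hall rest
    have hv : v = x := hall v (by simp)
    subst hv
    rw [PySem.List.enumerate_cons]
    simp only [List.cons_append, List.map_cons]
    show pvRun v c (v :: (r' ++ rest)) = _
    rw [pvRun, if_pos rfl, ih (c + 1) (fun w hw => hall w (by simp [hw])) rest,
      show c + 1 + (r'.length : Int) = c + (((v :: r').length : Nat) : Int) by simp only [List.length_cons]; push_cast; ring]

theorem pvRender_pos (r : List Int) : ∀ (s : Int), 1 ≤ s →
    (PySem.List.enumerate r s).map pvRender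
      = (PySem.List.enumerate r s).map
          (fun iv => PySem.Int.toStr iv.2 ++ "_" ++ PySem.Int.toStr iv.1) := by
  induction r with
  | nil => intro s _; simp [PySem.List.enumerate]
  | cons v r' ih =>
    intro s hs
    rw [PySem.List.enumerate_cons]
    simp only [List.map_cons]
    rw [ih (s + 1) (by omega)]
    congr 1
    simp [pvRender, show s ≠ 0 by omega]

theorem pvB_eq : ∀ (n : Nat) (L : List Int), L.length ≤ n →
    update_positions_alt L = match L with
      | [] => []
      | x :: xs => PySem.Int.toStr x :: pvRun x 0 xs := by
  intro n
  induction n with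
  | zero =>
    intro L hL
    rw [List.length_eq_zero_iff.mp (Nat.le_zero.mp hL)]
    rw [update_positions_alt.eq_def]
  | succ n ih =>
    intro L hL
    cases L with
    | nil => rw [update_positions_alt.eq_def]
    | cons x xs =>
      rw [update_positions_alt.eq_def]
      dsimp only
      rw [PySem.List.enumerate_cons]
      simp only [List.map_cons, zero_add]
      have hsplit : xs = xs.takeWhile (fun y => y == x) ++ xs.dropWhile (fun y => y == x) :=
        (List.takeWhile_append_dropWhile).symm
      have hall : ∀ v ∈ xs.takeWhile (fun y => y == x), v = x := by
        intro v hv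
        exact by simpa using List.mem_takeWhile_imp hv
      have hdwlen : (xs.dropWhile (fun y => y == x)).length ≤ n := by
        have := List.length_dropWhile_le (fun y => y == x) xs
        simp at hL; omega
      have hrun := pvRun_append (xs.takeWhile (fun y => y == x)) x 0 hall
        (xs.dropWhile (fun y => y == x))
      have hrender : pvRender ((0 : Int), x) = PySem.Int.toStr x := by simp [pvRender]
      rw [hrender, pvRender_pos _ 1 (by omega)]
      show PySem.Int.toStr x :: _ ++ update_positions_alt (xs.dropWhile (fun y => y == x)) = _
      rw [ih _ hdwlen]
      conv_rhs => rw [hsplit]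
      simp only [zero_add] at hrun
      rw [hrun]
      cases hdw : xs.dropWhile (fun y => y == x) with
      | nil => simp [pvRun]
      | cons y t =>
        have hy : (y == x) = false := by
          have := List.head?_dropWhile_not (fun y => y == x) xs
          simp [hdw] at this
          simpa using this
        have hyne : y ≠ x := by simpa using hy
        simp [pvRun, hyne]

-- ===== VERDICT (by name: the statement is the Claim_ definition above) =====
theorem update_positions_spec : Claim_equal_update_positions := by
  intro positions _
  show update_positions positions = update_positions_alt positions
  rw [pvA_eq, pvB_eq positions.length positions le_rfl]
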